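-- pv_equiv track=rewrite | github.com/jliu531/Code-Eval-Solutions | code-eval-problem-69.py | get_indices
-- ===== SOURCE A (Python) =====
-- def get_indices(string):
--     """inputs: a string
--     returns: a dictionary with each unique character as a key and a list of
--     the indices in which it occurs as the value
--     """
--     index_dict = {}
--     for i in range(len(string)):
--         if index_dict.get(string[i], -1) == -1:
--             index_dict[string[i]] = [i]
--         else:
--             index_dict[string[i]].append(i)
--     return index_dict
-- ===== SOURCE B (Python) =====
-- def get_indices(string):
--     return {c: [i for i, ch in enumerate(string) if ch == c]
--             for c in dict.fromkeys(string)}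
-- ===== Notes on version B (the rewrite author's own statement) =====
-- stated objective: idiomatic
-- what changed: A's single stateful pass that mutates a dict per index is replaced by a dict comprehension over the unique characters (dict.fromkeys order), each key's index list gathered by its own enumerate scan.
import Mathlib
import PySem

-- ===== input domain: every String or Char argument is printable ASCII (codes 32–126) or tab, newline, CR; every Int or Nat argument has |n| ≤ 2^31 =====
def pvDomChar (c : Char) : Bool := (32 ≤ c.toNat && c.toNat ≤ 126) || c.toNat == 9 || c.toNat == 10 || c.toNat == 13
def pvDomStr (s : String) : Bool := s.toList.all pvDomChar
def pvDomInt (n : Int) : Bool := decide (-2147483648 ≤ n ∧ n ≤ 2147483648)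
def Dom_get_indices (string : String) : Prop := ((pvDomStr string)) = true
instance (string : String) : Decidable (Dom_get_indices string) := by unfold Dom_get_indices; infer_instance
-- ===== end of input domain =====

-- B replaces A's single dict-mutating pass by a per-unique-character comprehension (idiomatic, same result).

-- ===== PORT A =====
def get_indices (string : String) : List (String × List Int) :=
  let cs := string.toList
  let d := (PySem.List.pyRange 0 (PySem.Str.len string) 1).foldl
    (fun d i =>
      let key := String.mk [PySem.List.pyGetD cs i ' ']  -- string[i]; i is always in range, default unused
      match d.get? key with  -- index_dict.get(string[i], -1) == -1 ⟺ key absent (a list never equals -1)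
      | none => d.insert key [i]
      | some l => d.insert key (l ++ [i]))  -- .append mutates in place; insert overwrites keeping position
    PySem.Dict.empty
  d.items

-- ===== PORT B =====
def get_indices_alt (string : String) : List (String × List Int) :=
  let cs := string.toList
  (PySem.Set.ofList (cs.map (fun c => String.mk [c]))).map  -- dict.fromkeys(string): distinct 1-char strings
    (fun k => (k, ((PySem.List.enumerate cs 0).filter (fun p => String.mk [p.2] == k)).map (·.1)))

-- ===== PRECONDITION & SPEC =====
def Spec_get_indices (string : String) (out : List (String × List Int)) : Prop := out = get_indices_alt string
instance (string : String) (out : List (String × List Int)) : Decidable (Spec_get_indices string out) := by unfold Spec_get_indices; infer_instance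

-- ===== CLAIM (what is proved, stated in full; the proofs are below) =====
def Claim_equal_get_indices : Prop := ∀ (string : String), Dom_get_indices string → Spec_get_indices string (get_indices string)

-- ===== LEMMAS AND PROOFS =====

theorem get_indices_eq_alt (string : String) : get_indices string = get_indices_alt string := by
  simp only [get_indices, get_indices_alt]
  set cs := string.toList with hcs
  -- step function = modify
  have hstep : (fun (d : PySem.Dict String (List Int)) (i : Int) =>
      let key := String.mk [PySem.List.pyGetD cs i ' ']
      match d.get? key with
      | none => d.insert key [i]
      | some l => d.insert key (l ++ [i]))
      = fun d i => d.modify (String.mk [PySem.List.pyGetD cs i ' ']) [] (· ++ [i]) := by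
    funext d i
    set key := String.mk [PySem.List.pyGetD cs i ' ']
    show (match d.get? key with
      | none => d.insert key [i]
      | some l => d.insert key (l ++ [i])) = d.insert key (d.getD key [] ++ [i])
    cases h : d.get? key with
    | none => simp [PySem.Dict.getD_eq_get?_getD, h]
    | some l => simp [PySem.Dict.getD_eq_get?_getD, h]
  rw [hstep]
  have hlen : PySem.Str.len string = PySem.List.len cs := rfl
  rw [hlen]
  have henum : (PySem.List.pyRange 0 (PySem.List.len cs) 1).foldl
      (fun d i => d.modify (String.mk [PySem.List.pyGetD cs i ' ']) [] (· ++ [i])) PySem.Dict.empty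
      = ((PySem.List.enumerate cs 0).map (fun p => (String.mk [p.2], p.1))).foldl
        (fun d p => d.modify p.1 [] (· ++ [p.2])) PySem.Dict.empty := by
    rw [List.foldl_map, PySem.List.enumerate_eq_map_pyRange cs ' ', List.foldl_map]
  rw [henum]
  set L := (PySem.List.enumerate cs 0).map (fun p => (String.mk [p.2], p.1)) with hL
  have hnodup : ((L.foldl (fun d p => d.modify p.1 [] (· ++ [p.2])) PySem.Dict.empty)).keys.Nodup := by
    exact PySem.Dict.nodup_keys_foldl_modify_key L Prod.fst [] (fun _ p v => v ++ [p.2]) _ (by simp)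
  rw [PySem.Dict.items_eq_map_keys _ hnodup []]
  have hkeys : (L.foldl (fun d p => d.modify p.1 [] (· ++ [p.2])) PySem.Dict.empty).keys
      = PySem.Set.ofList (cs.map (fun c => String.mk [c])) := by
    rw [PySem.Dict.keys_foldl_modify_key L Prod.fst [] (fun _ p v => v ++ [p.2])]
    have : L.map Prod.fst = cs.map (fun c => String.mk [c]) := by
      rw [hL, List.map_map]
      have := PySem.List.map_snd_enumerate cs 0
      calc (PySem.List.enumerate cs 0).map (Prod.fst ∘ fun p => (String.mk [p.2], p.1))
          = (PySem.List.enumerate cs 0).map ((fun c => String.mk [c]) ∘ (fun p => p.2)) := rfl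
        _ = ((PySem.List.enumerate cs 0).map (fun p => p.2)).map (fun c => String.mk [c]) := by
              rw [List.map_map]
        _ = cs.map (fun c => String.mk [c]) := by rw [this]
    simp [this, PySem.Set.update_nil_left]
  rw [hkeys]
  apply List.map_congr_left
  intro k _
  congr 1
  rw [PySem.Dict.getD_foldl_modify_append L PySem.Dict.empty k]
  rw [hL, List.filter_map, List.map_map]
  simp [Function.comp_def]


-- ===== VERDICT (by name: the statement is the Claim_ definition above) =====
theorem get_indices_spec : Claim_equal_get_indices := by
  intro string _
  exact get_indices_eq_alt string
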